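-- pv_equiv track=rewrite | github.com/TPAFS/hicric | src/modeling/background_extraction.py | find_contiguous_ones_indices
-- ===== SOURCE A (Python) =====
-- def find_contiguous_ones_indices(lst: list[int]) -> tuple[list[int], list[int]]:
--     """Given a list of 0s and 1s, provide list of start and list of end indices for
--     sequences of 1s.
--
--     E.g. lst = [0, 0, 1, 1, 1, 0, 0, 0, 1, 1, 1]
--
--     yields start_indices = [2, 8], end_indices = [4, 10]
--     """
--     start_indices = []
--     end_indices = []
--     start = None
--
--     for i, num in enumerate(lst):
--         if num == 1:
--             if start is None:
--                 start = i
--         elif start is not None: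
--             # End of a contiguous sequence of 1s
--             start_indices.append(start)
--             end_indices.append(i - 1)
--             start = None
--
--     # Check if the last element is 1
--     if start is not None:
--         start_indices.append(start)
--         end_indices.append(len(lst) - 1)
--
--     return start_indices, end_indices
-- ===== SOURCE B (Python) =====
-- def find_contiguous_ones_indices(lst: list[int]) -> tuple[list[int], list[int]]:
--     """Run-splitting scan: skip non-1s; on a 1, scan the whole run at once and
--     record its first and last index."""
--     starts = []
--     ends = []
--     n = len(lst)
--     i = 0
--     while i < n:
--         if lst[i] == 1:
--             j = i
--             while j + 1 < n and lst[j + 1] == 1: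
--                 j += 1
--             starts.append(i)
--             ends.append(j)
--             i = j + 1
--         else:
--             i += 1
--     return starts, ends
-- ===== Notes on version B (the rewrite author's own statement) =====
-- stated objective: alternative
-- what changed: Replaces A's per-element state machine (an Optional 'start' carried through one enumerate loop plus a post-loop check) with a run-splitting scan: skip non-1 elements; on a 1, an inner scan finds the run's last index and both boundaries are recorded at once, so no Optional state and no after-loop fixup exist.
import Mathlib
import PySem

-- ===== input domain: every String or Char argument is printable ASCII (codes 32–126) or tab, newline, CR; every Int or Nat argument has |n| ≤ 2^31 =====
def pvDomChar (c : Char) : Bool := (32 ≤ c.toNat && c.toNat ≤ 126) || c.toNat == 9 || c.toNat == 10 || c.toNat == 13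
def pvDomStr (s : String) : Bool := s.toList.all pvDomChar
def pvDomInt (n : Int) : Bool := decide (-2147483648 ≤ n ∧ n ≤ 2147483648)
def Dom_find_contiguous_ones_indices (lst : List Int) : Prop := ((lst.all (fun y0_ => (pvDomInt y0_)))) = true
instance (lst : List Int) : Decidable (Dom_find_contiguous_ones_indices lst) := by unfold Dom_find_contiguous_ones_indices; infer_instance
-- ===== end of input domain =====

-- B replaces A's stateful scan (Optional `start` + post-loop check) by a run-splitting scan; alternative decomposition, same O(n) cost.

-- ===== PORT A =====
-- the for-loop: state (start_indices, end_indices, start), index i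
def fcoiLoopA (l : List Int) (i : Int) (ss es : List Int) (start : Option Int) :
    List Int × List Int × Option Int :=
  match l with
  | [] => (ss, es, start)
  | num :: rest =>
    if num = 1 then
      fcoiLoopA rest (i + 1) ss es (match start with | none => some i | some s => some s)
    else
      match start with
      | some s => fcoiLoopA rest (i + 1) (ss ++ [s]) (es ++ [i - 1]) none
      | none => fcoiLoopA rest (i + 1) ss es none

-- the post-loop "check if the last element is 1"
def fcoiFinish (total : Int) : List Int × List Int × Option Int → List Int × List Int
  | (ss, es, some s) => (ss ++ [s], es ++ [total - 1])
  | (ss, es, none) => (ss, es)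

def find_contiguous_ones_indices (lst : List Int) : List Int × List Int :=
  fcoiFinish (lst.length : Int) (fcoiLoopA lst 0 [] [] none)

-- ===== PORT B =====
-- outer while-loop = this recursion; the inner `while j+1 < n and lst[j+1]==1` scan = takeWhile/dropWhile over the remainder
def fcoiLoopB (l : List Int) (i : Int) : List Int × List Int :=
  match l with
  | [] => ([], [])
  | x :: xs =>
    if x = 1 then
      let run := xs.takeWhile (fun a => a == 1)
      let rest := xs.dropWhile (fun a => a == 1)
      let p := fcoiLoopB rest (i + (run.length : Int) + 1)
      (i :: p.1, (i + (run.length : Int)) :: p.2)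
    else
      fcoiLoopB xs (i + 1)
termination_by l.length
decreasing_by
  · exact Nat.lt_succ_of_le (xs.length_dropWhile_le _)
  · simp

def find_contiguous_ones_indices_alt (lst : List Int) : List Int × List Int :=
  fcoiLoopB lst 0

-- ===== PRECONDITION & SPEC =====
def Spec_find_contiguous_ones_indices (lst : List Int) (out : List Int × List Int) : Prop := out = find_contiguous_ones_indices_alt lst
instance (lst : List Int) (out : List Int × List Int) : Decidable (Spec_find_contiguous_ones_indices lst out) := by unfold Spec_find_contiguous_ones_indices; infer_instance

-- ===== CLAIM (what is proved, stated in full; the proofs are below) =====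
def Claim_equal_find_contiguous_ones_indices : Prop := ∀ (lst : List Int), Dom_find_contiguous_ones_indices lst → Spec_find_contiguous_ones_indices lst (find_contiguous_ones_indices lst)

-- ===== LEMMAS AND PROOFS =====

-- first element of a non-empty dropWhile fails the predicate
theorem head_dropWhile_false {α : Type} (p : α → Bool) (l : List α) (y : α) (ys : List α)
    (h : l.dropWhile p = y :: ys) : p y = false := by
  induction l with
  | nil => simp [List.dropWhile] at h
  | cons a t ih =>
    by_cases hp : p a
    · exact ih (by simpa [List.dropWhile, hp] using h)
    · simp [List.dropWhile, hp] at h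
      simp [h.1 ▸ hp]

-- while inside a run (start = some s) the loop consumes the run, then closes it
theorem fcoiLoopA_some (total : Int) :
    ∀ (l : List Int) (i : Int) (ss es : List Int) (s : Int),
    fcoiFinish total (fcoiLoopA l i ss es (some s)) =
      (match l.dropWhile (fun a => a == 1) with
       | [] => (ss ++ [s], es ++ [total - 1])
       | _ :: rest =>
          fcoiFinish total
            (fcoiLoopA rest (i + ((l.takeWhile (fun a => a == 1)).length : Int) + 1)
              (ss ++ [s]) (es ++ [i + ((l.takeWhile (fun a => a == 1)).length : Int) - 1]) none)) := by
  intro l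
  induction l with
  | nil => intro i ss es s; simp [fcoiLoopA, fcoiFinish]
  | cons x xs ih =>
    intro i ss es s
    by_cases hx : x = 1
    · subst hx
      have : fcoiLoopA ((1:Int) :: xs) i ss es (some s) = fcoiLoopA xs (i + 1) ss es (some s) := by
        simp [fcoiLoopA]
      rw [this, ih]
      simp [List.dropWhile, List.takeWhile]
      cases h : xs.dropWhile (fun a => a == 1) with
      | nil => simp
      | cons y ys =>
        simp
        ring_nf
    · have hxb : (x == (1:Int)) = false := by simpa using hx
      rw [fcoiLoopA]
      simp only [if_neg hx, List.dropWhile_cons, List.takeWhile_cons, hxb]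
      norm_num

-- in the between-runs state (start = none) the loop computes exactly B's scan
theorem fcoiLoopA_none :
    ∀ (n : Nat) (l : List Int), l.length ≤ n → ∀ (i total : Int) (ss es : List Int),
    i + (l.length : Int) = total →
    fcoiFinish total (fcoiLoopA l i ss es none) =
      (ss ++ (fcoiLoopB l i).1, es ++ (fcoiLoopB l i).2) := by
  intro n
  induction n with
  | zero =>
    intro l hl i total ss es htot
    have : l = [] := List.eq_nil_of_length_eq_zero (Nat.le_zero.mp hl)
    subst this
    simp [fcoiLoopA, fcoiLoopB, fcoiFinish]
  | succ m ih =>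
    intro l hl i total ss es htot
    cases l with
    | nil => simp [fcoiLoopA, fcoiLoopB, fcoiFinish]
    | cons x xs =>
      by_cases hx : x = 1
      · subst hx
        have hstep : fcoiLoopA ((1:Int) :: xs) i ss es none = fcoiLoopA xs (i + 1) ss es (some i) := by
          simp [fcoiLoopA]
        rw [hstep, fcoiLoopA_some]
        have hsplit := xs.takeWhile_append_dropWhile (p := fun a => a == 1)
        cases hdw : xs.dropWhile (fun a => a == 1) with
        | nil =>
          -- the run reaches the end of the list
          have htw : xs.takeWhile (fun a => a == 1) = xs := by
            conv_rhs => rw [← hsplit]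
            rw [hdw, List.append_nil]
          have hfin : total - 1 = i + (xs.length : Int) := by
            simp at htot; omega
          rw [fcoiLoopB]
          simp [hdw, htw, fcoiLoopB, hfin]
        | cons y ys =>
          have hy : (y == (1:Int)) = false := head_dropWhile_false _ xs y ys hdw
          have hy1 : ¬ y = 1 := by simpa using hy
          have hlen : xs.length = (xs.takeWhile (fun a => a == 1)).length + 1 + ys.length := by
            have := congrArg List.length hsplit
            simp [hdw] at this
            omega
          dsimp only
          have e1 : i + 1 + ((xs.takeWhile (fun a => a == 1)).length : Int) + 1
              = i + ((xs.takeWhile (fun a => a == 1)).length : Int) + 1 + 1 := by ring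
          have e2 : i + 1 + ((xs.takeWhile (fun a => a == 1)).length : Int) - 1
              = i + ((xs.takeWhile (fun a => a == 1)).length : Int) := by ring
          rw [e1, e2]
          rw [ih ys (by simp at hl; omega) _ total _ _
            (by simp at htot; omega)]
          conv_rhs => rw [fcoiLoopB]
          rw [if_pos rfl]
          dsimp only
          rw [hdw]
          conv_rhs => rw [fcoiLoopB]
          rw [if_neg hy1]
          simp
      · have hstep : fcoiLoopA (x :: xs) i ss es none = fcoiLoopA xs (i + 1) ss es none := by
          simp [fcoiLoopA, hx]
        rw [hstep, ih xs (by simp at hl; omega) (i+1) total ss es (by simp at htot ⊢; omega)]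
        rw [fcoiLoopB]
        simp [hx]

-- ===== VERDICT (by name: the statement is the Claim_ definition above) =====
theorem find_contiguous_ones_indices_spec : Claim_equal_find_contiguous_ones_indices := by
  intro lst _
  unfold Spec_find_contiguous_ones_indices find_contiguous_ones_indices find_contiguous_ones_indices_alt
  rw [fcoiLoopA_none lst.length lst le_rfl 0 (lst.length : Int) [] [] (by simp)]
  simp
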